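-- pv_equiv track=rewrite | github.com/vmrh21/acp-workflows | internal-workflows/pr-overview/scripts/structure-pr-data.py | build_ci
-- ===== SOURCE A (Python) =====
-- def build_ci(check_runs):
--     """Categorize check runs into passing/failing/pending."""
--     passing, failing, pending = [], [], []
--     for cr in check_runs:
--         name = cr.get("name", "unknown")
--         status = cr.get("status", "")
--         conclusion = cr.get("conclusion", "")
--         if status != "completed":
--             pending.append({"name": name, "status": status})
--         elif conclusion in ("failure", "timed_out", "cancelled", "action_required"):
--             failing.append({
--                 "name": name,
--                 "conclusion": conclusion,
--                 "run_id": cr.get("id", ""),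
--                 "html_url": cr.get("html_url", ""),
--             })
--         else:
--             passing.append(name)
--     return passing, failing, pending
-- ===== SOURCE B (Python) =====
-- _FAIL = ("failure", "timed_out", "cancelled", "action_required")
--
-- def _completed(cr):
--     return cr.get("status", "") == "completed"
--
-- def build_ci(check_runs):
--     """Categorize check runs into passing/failing/pending (three independent passes)."""
--     passing = [cr.get("name", "unknown") for cr in check_runs
--                if _completed(cr) and cr.get("conclusion", "") not in _FAIL]
--     failing = [{"name": cr.get("name", "unknown"),
--                 "conclusion": cr.get("conclusion", ""),
--                 "run_id": cr.get("id", ""),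
--                 "html_url": cr.get("html_url", "")}
--                for cr in check_runs
--                if _completed(cr) and cr.get("conclusion", "") in _FAIL]
--     pending = [{"name": cr.get("name", "unknown"), "status": cr.get("status", "")}
--                for cr in check_runs if not _completed(cr)]
--     return passing, failing, pending
-- ===== Notes on version B (the rewrite author's own statement) =====
-- stated objective: idiomatic
-- what changed: The single three-way partitioning loop with mutable accumulators is replaced by three independent filtering passes over check_runs, one comprehension per bucket, with predicates that are exact complements.
import Mathlib
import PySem

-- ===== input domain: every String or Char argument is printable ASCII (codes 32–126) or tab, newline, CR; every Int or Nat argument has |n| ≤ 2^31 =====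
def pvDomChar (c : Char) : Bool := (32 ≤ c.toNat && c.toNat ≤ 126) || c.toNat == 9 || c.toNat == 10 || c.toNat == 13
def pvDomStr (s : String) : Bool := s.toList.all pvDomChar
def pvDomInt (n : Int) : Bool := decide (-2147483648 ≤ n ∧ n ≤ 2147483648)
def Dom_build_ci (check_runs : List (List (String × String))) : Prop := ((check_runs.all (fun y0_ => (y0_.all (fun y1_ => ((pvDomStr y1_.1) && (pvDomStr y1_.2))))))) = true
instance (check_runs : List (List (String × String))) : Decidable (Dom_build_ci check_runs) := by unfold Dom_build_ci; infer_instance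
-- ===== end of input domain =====

-- B replaces A's single three-way partitioning loop with three independent filter+map passes (one per bucket, predicates exact complements) for a plainer, more idiomatic decomposition; same O(n) cost.

-- ===== PORT A =====
-- cr.get(k, dflt): first match in the association list, else the default (Python dict.get)
def pyGetD (d : List (String × String)) (k dflt : String) : String :=
  match d.find? (fun p => p.1 == k) with
  | some p => p.2
  | none => dflt

-- literal transliteration of A: one fold over check_runs carrying the three buckets
def build_ci (check_runs : List (List (String × String))) : List String × (List (List (String × String))) × (List (List (String × String))) :=
  check_runs.foldl
    (fun acc cr =>
      let name := pyGetD cr "name" "unknown"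
      let status := pyGetD cr "status" ""
      let conclusion := pyGetD cr "conclusion" ""
      if status ≠ "completed" then
        (acc.1, acc.2.1, acc.2.2 ++ [[("name", name), ("status", status)]])
      else if conclusion = "failure" ∨ conclusion = "timed_out" ∨ conclusion = "cancelled" ∨ conclusion = "action_required" then
        (acc.1, acc.2.1 ++ [[("name", name), ("conclusion", conclusion), ("run_id", pyGetD cr "id" ""), ("html_url", pyGetD cr "html_url" "")]], acc.2.2)
      else
        (acc.1 ++ [name], acc.2.1, acc.2.2))
    ([], [], [])

-- ===== PORT B =====
def isFailConclusion (c : String) : Bool :=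
  c == "failure" || c == "timed_out" || c == "cancelled" || c == "action_required"

def isCompleted (cr : List (String × String)) : Bool :=
  pyGetD cr "status" "" == "completed"

-- port of B: three independent filter-then-map passes, one per bucket
def build_ci_alt (check_runs : List (List (String × String))) : List String × (List (List (String × String))) × (List (List (String × String))) :=
  ((check_runs.filter (fun cr => isCompleted cr && !isFailConclusion (pyGetD cr "conclusion" ""))).map
      (fun cr => pyGetD cr "name" "unknown"),
   (check_runs.filter (fun cr => isCompleted cr && isFailConclusion (pyGetD cr "conclusion" ""))).map
      (fun cr => [("name", pyGetD cr "name" "unknown"), ("conclusion", pyGetD cr "conclusion" ""), ("run_id", pyGetD cr "id" ""), ("html_url", pyGetD cr "html_url" "")]),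
   (check_runs.filter (fun cr => !isCompleted cr)).map
      (fun cr => [("name", pyGetD cr "name" "unknown"), ("status", pyGetD cr "status" "")]))

-- ===== PRECONDITION & SPEC =====
def Spec_build_ci (check_runs : List (List (String × String))) (out : List String × (List (List (String × String))) × (List (List (String × String)))) : Prop := out = build_ci_alt check_runs
instance (check_runs : List (List (String × String))) (out : List String × (List (List (String × String))) × (List (List (String × String)))) : Decidable (Spec_build_ci check_runs out) := by unfold Spec_build_ci; infer_instance

-- ===== CLAIM (what is proved, stated in full; the proofs are below) =====
def Claim_equal_build_ci : Prop := ∀ (check_runs : List (List (String × String))), Dom_build_ci check_runs → Spec_build_ci check_runs (build_ci check_runs)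

-- ===== LEMMAS AND PROOFS =====

-- the accumulator invariant of A's fold: prefixes carry through, and each element
-- lands in the bucket picked out by B's predicates
theorem build_ci_fold_inv (xs : List (List (String × String)))
    (p : List String) (f q : List (List (String × String))) :
    xs.foldl
      (fun acc cr =>
        let name := pyGetD cr "name" "unknown"
        let status := pyGetD cr "status" ""
        let conclusion := pyGetD cr "conclusion" ""
        if status ≠ "completed" then
          (acc.1, acc.2.1, acc.2.2 ++ [[("name", name), ("status", status)]])
        else if conclusion = "failure" ∨ conclusion = "timed_out" ∨ conclusion = "cancelled" ∨ conclusion = "action_required" then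
          (acc.1, acc.2.1 ++ [[("name", name), ("conclusion", conclusion), ("run_id", pyGetD cr "id" ""), ("html_url", pyGetD cr "html_url" "")]], acc.2.2)
        else
          (acc.1 ++ [name], acc.2.1, acc.2.2))
      (p, f, q)
    = (p ++ (build_ci_alt xs).1, f ++ (build_ci_alt xs).2.1, q ++ (build_ci_alt xs).2.2) := by
  induction xs generalizing p f q with
  | nil => simp [build_ci_alt]
  | cons cr xs ih =>
    simp only [List.foldl_cons]
    by_cases hc : pyGetD cr "status" "" = "completed"
    · by_cases hf : pyGetD cr "conclusion" "" = "failure" ∨ pyGetD cr "conclusion" "" = "timed_out" ∨ pyGetD cr "conclusion" "" = "cancelled" ∨ pyGetD cr "conclusion" "" = "action_required"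
      · have hfb : isFailConclusion (pyGetD cr "conclusion" "") = true := by
          simp [isFailConclusion]; tauto
        simp only [if_pos hf, ih,
          build_ci_alt, List.filter_cons, isCompleted, hc, hfb]
        simp [List.append_assoc]
      · have hfb : isFailConclusion (pyGetD cr "conclusion" "") = false := by
          simp [isFailConclusion]; tauto
        simp only [if_neg hf, ih,
          build_ci_alt, List.filter_cons, isCompleted, hc, hfb]
        simp [List.append_assoc]
    · have hcb : isCompleted cr = false := by simp [isCompleted, hc]
      simp only [if_pos hc, ih, build_ci_alt, List.filter_cons, hcb]
      simp [List.append_assoc]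

-- ===== VERDICT (by name: the statement is the Claim_ definition above) =====
theorem build_ci_spec : Claim_equal_build_ci := by
  intro check_runs _
  unfold Spec_build_ci build_ci
  rw [build_ci_fold_inv]
  simp
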